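-- pv_equiv track=rewrite | github.com/eea/volto-blocks-converter | app/html2slate.py | merge_adjacent_text_nodes
-- ===== SOURCE A (Python) =====
-- def merge_adjacent_text_nodes(children):
--     "Given a list of Slate elements, it combines adjacent texts nodes"
--
--     ranges = []
--     for i, v in enumerate(children):
--         if "text" in v:
--             if ranges and ranges[-1][1] == i - 1:
--                 ranges[-1][1] = i
--             else:
--                 ranges.append([i, i])
--     text_positions = []
--     range_dict = {}
--     for start, end in ranges:
--         text_positions.extend(list(range(start, end + 1)))
--         range_dict[start] = end
--
--     result = []
--     for i, v in enumerate(children):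
--         if i not in text_positions:
--             result.append(v)
--         if i in range_dict:
--             d = range_dict[i] + 1
--             slice = children[i:d]
--             node = {}
--             if slice:
--                 node = slice[0]
--             node["text"] = "".join([c["text"] for c in slice])
--             result.append(node)
--
--     return result
-- ===== SOURCE B (Python) =====
-- def merge_adjacent_text_nodes(children):
--     "Given a list of Slate elements, it combines adjacent texts nodes"
--     result = []
--     run = []  # current maximal run of adjacent text nodes
--
--     def flush():
--         if run:
--             merged = dict(run[0])
--             merged["text"] = "".join(c["text"] for c in run)
--             result.append(merged)
--             run.clear()
--
--     for v in children:
--         if "text" in v: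
--             run.append(v)
--         else:
--             flush()
--             result.append(v)
--     flush()
--     return result
-- ===== Notes on version B (the rewrite author's own statement) =====
-- stated objective: simpler
-- what changed: Replaces A's three passes (building index ranges, a list of all text positions queried with 'i not in list', and a dict of run starts) with a single pass that accumulates the current run of adjacent text nodes and flushes it when it ends.
import Mathlib
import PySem

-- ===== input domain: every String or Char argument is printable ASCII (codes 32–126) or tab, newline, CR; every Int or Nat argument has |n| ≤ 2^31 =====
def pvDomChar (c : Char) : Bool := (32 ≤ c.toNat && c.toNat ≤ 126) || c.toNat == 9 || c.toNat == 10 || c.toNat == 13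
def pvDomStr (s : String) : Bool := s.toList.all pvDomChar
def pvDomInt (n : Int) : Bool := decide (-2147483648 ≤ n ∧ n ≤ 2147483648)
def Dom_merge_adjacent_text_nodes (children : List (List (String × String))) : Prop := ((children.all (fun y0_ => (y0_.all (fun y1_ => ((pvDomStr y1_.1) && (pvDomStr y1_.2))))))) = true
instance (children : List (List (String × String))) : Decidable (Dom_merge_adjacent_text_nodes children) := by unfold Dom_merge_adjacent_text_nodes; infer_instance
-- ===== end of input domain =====

-- B replaces A's three passes (index-range list, text-position list, run-start dict) by a single pass
-- that accumulates the current run of adjacent text nodes and flushes it when the run ends.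
-- Note: Python A mutates the run-start dicts of `children` in place; B does not — the theorems are about the return value.

-- shared dict primitives ('"text" in v', 'v["text"]', 'v["text"] = t', '"".join(...)')
def pvHasText (v : List (String × String)) : Bool := v.any (fun p => p.1 == "text")

def pvGetText (v : List (String × String)) : String := ((v.find? (fun p => p.1 == "text")).map (·.2)).getD ""

def pvSetText : List (String × String) → String → List (String × String)
  | [], t => [("text", t)]
  | p :: rest, t => if p.1 == "text" then ("text", t) :: rest else p :: pvSetText rest t

def pvJoinTexts (slice : List (List (String × String))) : String := PySem.Str.join "" (slice.map pvGetText)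

-- ===== PORT A =====
-- `ranges` is kept reversed while being built (Python reads/updates only ranges[-1], the head here)
-- and reversed once at the end of the first pass.
def pvPushRange (rs : List (Int × Int)) (i : Int) : List (Int × Int) :=
  match rs with
  | [] => [(i, i)]
  | (s, e) :: rest => if e == i - 1 then (s, i) :: rest else (i, i) :: (s, e) :: rest

def pvRangesGo (i : Int) (rs : List (Int × Int)) : List (List (String × String)) → List (Int × Int)
  | [] => rs.reverse
  | v :: rest => pvRangesGo (i + 1) (if pvHasText v then pvPushRange rs i else rs) rest

def pvTps (ranges : List (Int × Int)) : List Int :=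
  ranges.foldl (fun acc r => acc ++ PySem.List.pyRange r.1 (r.2 + 1) 1) []

def pvRd (ranges : List (Int × Int)) : PySem.Dict Int Int :=
  ranges.foldl (fun d r => d.insert r.1 r.2) PySem.Dict.empty

def pvMergedNode (children : List (List (String × String))) (i e : Int) : List (String × String) :=
  let slice := PySem.List.slice children (some i) (some (e + 1))
  let node := match slice with | [] => [] | s :: _ => s
  pvSetText node (pvJoinTexts slice)

def pvOutGo (children : List (List (String × String))) (tps : List Int) (rd : PySem.Dict Int Int)
    (i : Int) : List (List (String × String)) → List (List (String × String))
  | [] => []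
  | v :: rest =>
      (if tps.contains i then [] else [v]) ++
      (match rd.get? i with
       | some e => [pvMergedNode children i e]
       | none => []) ++
      pvOutGo children tps rd (i + 1) rest

def merge_adjacent_text_nodes (children : List (List (String × String))) : List (List (String × String)) :=
  let ranges := pvRangesGo 0 [] children
  pvOutGo children (pvTps ranges) (pvRd ranges) 0 children

-- ===== PORT B =====
def pvFlush (run : List (List (String × String))) : List (List (String × String)) :=
  match run with
  | [] => []
  | r :: _ => [pvSetText r (pvJoinTexts run)]

def pvBGo (run : List (List (String × String))) : List (List (String × String)) → List (List (String × String))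
  | [] => pvFlush run
  | v :: rest => if pvHasText v then pvBGo (run ++ [v]) rest else pvFlush run ++ v :: pvBGo [] rest

def merge_adjacent_text_nodes_alt (children : List (List (String × String))) : List (List (String × String)) :=
  pvBGo [] children

-- ===== PRECONDITION & SPEC =====
def Spec_merge_adjacent_text_nodes (children : List (List (String × String))) (out : List (List (String × String))) : Prop := out = merge_adjacent_text_nodes_alt children
instance (children : List (List (String × String))) (out : List (List (String × String))) : Decidable (Spec_merge_adjacent_text_nodes children out) := by unfold Spec_merge_adjacent_text_nodes; infer_instance

-- ===== CLAIM (what is proved, stated in full; the proofs are below) =====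
def Claim_equal_merge_adjacent_text_nodes : Prop := ∀ (children : List (List (String × String))), Dom_merge_adjacent_text_nodes children → Spec_merge_adjacent_text_nodes children (merge_adjacent_text_nodes children)

-- ===== LEMMAS AND PROOFS =====

-- the list of maximal runs of adjacent text nodes of l, as (start,end) index pairs from offset i
def pvRuns (i : Int) : List (List (String × String)) → List (Int × Int)
  | [] => []
  | v :: rest =>
      if pvHasText v then
        (i, i + ((rest.takeWhile pvHasText).length : Int)) ::
          pvRuns (i + ((rest.takeWhile pvHasText).length : Int) + 1) (rest.dropWhile pvHasText)
      else
        pvRuns (i + 1) rest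
  termination_by l => l.length
  decreasing_by
    · simp; exact List.length_dropWhile_le _ _
    · simp

-- every run of pvRuns i l starts at or after i and has start ≤ end
lemma pvRuns_lb : ∀ (i : Int) (l : List (List (String × String))) (p : Int × Int),
    p ∈ pvRuns i l → i ≤ p.1 ∧ p.1 ≤ p.2 := by
  intro i l
  induction i, l using pvRuns.induct with
  | case1 i => intro p h; simp [pvRuns] at h
  | case2 i v rest h ih =>
      intro p hp
      rw [pvRuns, if_pos h] at hp
      rcases List.mem_cons.1 hp with rfl | hp'
      · exact ⟨le_refl _, by simp⟩
      · have := ih p hp'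
        omega
  | case3 i v rest h ih =>
      intro p hp
      rw [pvRuns, if_neg h] at hp
      have := ih p hp
      omega

-- the first pass of A computes exactly pvRuns
lemma pvRangesGo_spec : ∀ (l : List (List (String × String))) (i : Int),
    (∀ rs : List (Int × Int), (∀ s e, rs.head? = some (s, e) → e < i - 1) →
       pvRangesGo i rs l = rs.reverse ++ pvRuns i l)
    ∧ (∀ (s₀ : Int) (rs : List (Int × Int)),
       pvRangesGo i ((s₀, i - 1) :: rs) l =
         rs.reverse ++ (s₀, i - 1 + ((l.takeWhile pvHasText).length : Int)) ::
           pvRuns (i + ((l.takeWhile pvHasText).length : Int)) (l.dropWhile pvHasText)) := by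
  intro l
  induction l with
  | nil =>
      intro i
      constructor
      · intro rs _; simp [pvRangesGo, pvRuns]
      · intro s₀ rs; simp [pvRangesGo, pvRuns]
  | cons v rest ih =>
      intro i
      constructor
      · intro rs hinv
        by_cases h : pvHasText v
        · have hpush : pvPushRange rs i = (i, i) :: rs := by
            match rs with
            | [] => rfl
            | (s, e) :: rest' =>
                have := hinv s e rfl
                simp [pvPushRange]; omega
          rw [pvRangesGo, if_pos h, hpush]
          have h2 := (ih (i + 1)).2 i rs
          rw [show i + 1 - 1 = i by ring,
              show i + 1 + ((rest.takeWhile pvHasText).length : Int)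
                 = i + ((rest.takeWhile pvHasText).length : Int) + 1 by ring] at h2
          rw [h2, pvRuns, if_pos h]
        · rw [pvRangesGo, if_neg h]
          rw [(ih (i + 1)).1 rs (fun s e he => by have := hinv s e he; omega)]
          rw [pvRuns, if_neg h]
      · intro s₀ rs
        by_cases h : pvHasText v
        · have hpush : pvPushRange ((s₀, i - 1) :: rs) i = (s₀, i) :: rs := by
            simp [pvPushRange]
          rw [pvRangesGo, if_pos h, hpush]
          have h2 := (ih (i + 1)).2 s₀ rs
          rw [show i + 1 - 1 = i by ring] at h2
          rw [h2]
          simp only [List.takeWhile_cons, List.dropWhile_cons, h, if_pos, List.length_cons]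
          push_cast
          rw [show i - 1 + (((rest.takeWhile pvHasText).length : Int) + 1)
                = i + ((rest.takeWhile pvHasText).length : Int) by ring,
              show i + (((rest.takeWhile pvHasText).length : Int) + 1)
                = i + 1 + ((rest.takeWhile pvHasText).length : Int) by ring]
        · have hb : pvHasText v = false := by simpa using h
          rw [pvRangesGo, if_neg h]
          rw [(ih (i + 1)).1 ((s₀, i - 1) :: rs) (by intro s e he; simp at he; omega)]
          simp only [List.takeWhile_cons, List.dropWhile_cons, hb, Bool.false_eq_true, if_false]
          rw [pvRuns, if_neg h]
          simp

-- A's text_positions loop flattens the ranges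
lemma pvTps_flat (R : List (Int × Int)) (acc : List Int) :
    R.foldl (fun acc r => acc ++ PySem.List.pyRange r.1 (r.2 + 1) 1) acc
      = acc ++ R.flatMap (fun r => PySem.List.pyRange r.1 (r.2 + 1) 1) := by
  induction R generalizing acc with
  | nil => simp
  | cons r R ih => simp [List.foldl_cons, ih]

-- membership in A's text_positions list
lemma pvTps_contains_iff (R : List (Int × Int)) (j : Int) :
    (pvTps R).contains j = true ↔ ∃ p ∈ R, p.1 ≤ j ∧ j ≤ p.2 := by
  rw [pvTps, pvTps_flat]
  simp only [List.nil_append, List.contains_eq_mem, List.mem_flatMap, decide_eq_true_eq,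
    PySem.List.mem_pyRange_one]
  constructor
  · rintro ⟨p, hp, h1, h2⟩
    exact ⟨p, hp, h1, by omega⟩
  · rintro ⟨p, hp, h1, h2⟩
    exact ⟨p, hp, h1, by omega⟩

-- A's range_dict lookups
lemma pvRd_pass (R : List (Int × Int)) (d : PySem.Dict Int Int) (j : Int) (h : ∀ p ∈ R, p.1 ≠ j) :
    (R.foldl (fun d r => d.insert r.1 r.2) d).get? j = d.get? j := by
  induction R generalizing d with
  | nil => rfl
  | cons r R ih =>
      simp only [List.foldl_cons]
      rw [ih _ (fun p hp => h p (by simp [hp]))]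
      exact PySem.Dict.get?_insert_of_ne _ _ (fun he => h r (by simp) (by omega))

lemma pvRd_get_none (R : List (Int × Int)) (j : Int) (h : ∀ p ∈ R, p.1 ≠ j) :
    (pvRd R).get? j = none := by
  rw [pvRd, pvRd_pass R _ j h]; exact PySem.Dict.get?_empty j

lemma pvRd_get_decomp (past future : List (Int × Int)) (j E : Int)
    (hf : ∀ p ∈ future, p.1 ≠ j) :
    (pvRd (past ++ (j, E) :: future)).get? j = some E := by
  rw [pvRd, List.foldl_append, List.foldl_cons, pvRd_pass future _ j hf]
  exact PySem.Dict.get?_insert_self _ _ _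

-- B's loop, characterised by takeWhile/dropWhile
lemma pvBGo_split : ∀ (l acc : List (List (String × String))),
    pvBGo acc l = pvFlush (acc ++ l.takeWhile pvHasText) ++ pvBGo [] (l.dropWhile pvHasText) := by
  intro l
  induction l with
  | nil => intro acc; simp [pvBGo, pvFlush]
  | cons v rest ih =>
      intro acc
      by_cases h : pvHasText v
      · simp only [pvBGo, h, if_pos, List.takeWhile_cons_of_pos h, List.dropWhile_cons_of_pos h]
        rw [ih (acc ++ [v])]; simp
      · have hb : pvHasText v = false := by simpa using h
        simp [pvBGo, hb, pvFlush]

-- the main simulation: A's second pass over the suffix children.drop n equals B's loop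
lemma pvMain (children : List (List (String × String))) :
    ∀ (l : List (List (String × String))) (n : Nat) (past : List (Int × Int)),
    children.drop n = l →
    ((pvRuns 0 children = past ++ pvRuns (n : Int) l →
      (∀ p ∈ past, p.1 ≤ p.2 ∧ p.2 < (n : Int) - 1) →
      pvOutGo children (pvTps (pvRuns 0 children)) (pvRd (pvRuns 0 children)) (n : Int) l = pvBGo [] l)
     ∧ (∀ s₀ : Int, s₀ < (n : Int) →
      pvRuns 0 children = past ++ (s₀, (n : Int) - 1 + ((l.takeWhile pvHasText).length : Int)) ::
        pvRuns ((n : Int) + ((l.takeWhile pvHasText).length : Int)) (l.dropWhile pvHasText) →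
      (∀ p ∈ past, p.1 ≤ p.2 ∧ p.2 < s₀) →
      pvOutGo children (pvTps (pvRuns 0 children)) (pvRd (pvRuns 0 children)) (n : Int) l = pvBGo [] (l.dropWhile pvHasText))) := by
  intro l
  induction l with
  | nil =>
      intro n past _
      constructor
      · intro _ _; simp [pvOutGo, pvBGo, pvFlush]
      · intro s₀ _ _ _; simp [pvOutGo, pvBGo, pvFlush]
  | cons v rest ih =>
      intro n past hdrop
      have hrest : children.drop (n + 1) = rest := by
        have h1 : (children.drop n).drop 1 = rest := by rw [hdrop]; rfl
        rwa [List.drop_drop] at h1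
      constructor
      · -- OUT state: n is 0 or children[n-1] is not a text node
        intro hR hbnd
        by_cases h : pvHasText v
        · -- n starts a run
          have hstep : pvRuns ((n : Int)) (v :: rest)
              = ((n : Int), (n : Int) + ((rest.takeWhile pvHasText).length : Int)) ::
                pvRuns ((n : Int) + ((rest.takeWhile pvHasText).length : Int) + 1) (rest.dropWhile pvHasText) := by
            rw [pvRuns, if_pos h]
          rw [hstep] at hR
          have hcont : (pvTps (pvRuns 0 children)).contains (n : Int) = true := by
            apply (pvTps_contains_iff _ _).2
            refine ⟨((n : Int), (n : Int) + ((rest.takeWhile pvHasText).length : Int)), ?_, by omega, by omega⟩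
            rw [hR]; simp
          have hget : (pvRd (pvRuns 0 children)).get? (n : Int)
              = some ((n : Int) + ((rest.takeWhile pvHasText).length : Int)) := by
            rw [hR]
            refine pvRd_get_decomp _ _ _ _ ?_
            intro p hp
            have := pvRuns_lb _ _ p hp
            omega
          have htw : rest.takeWhile pvHasText = rest.take ((rest.takeWhile pvHasText).length) :=
            List.prefix_iff_eq_take.1 (List.takeWhile_prefix _)
          have hslice : PySem.List.slice children (some (n : Int))
              (some ((n : Int) + ((rest.takeWhile pvHasText).length : Int) + 1))
              = v :: rest.takeWhile pvHasText := by
            have hb : ((n : Int) + ((rest.takeWhile pvHasText).length : Int) + 1)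
                = ((n + ((rest.takeWhile pvHasText).length + 1) : Nat) : Int) := by push_cast; ring
            rw [hb, PySem.List.slice_natCast, hdrop,
              show n + ((rest.takeWhile pvHasText).length + 1) - n
                = (rest.takeWhile pvHasText).length + 1 from by omega,
              List.take_succ_cons, ← htw]
          have hin := (ih (n + 1) past hrest).2 (n : Int) (by push_cast; omega)
            (by push_cast
                rw [show ((n : Int) + 1 - 1 + ((rest.takeWhile pvHasText).length : Int))
                      = (n : Int) + ((rest.takeWhile pvHasText).length : Int) by ring,
                    show ((n : Int) + 1 + ((rest.takeWhile pvHasText).length : Int))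
                      = (n : Int) + ((rest.takeWhile pvHasText).length : Int) + 1 by ring]
                exact hR)
            (fun p hp => ⟨(hbnd p hp).1, by have := (hbnd p hp).2; omega⟩)
          push_cast at hin
          simp only [pvOutGo, hcont, if_true, hget, List.nil_append]
          rw [hin, pvBGo, if_pos h, List.nil_append]
          rw [pvBGo_split rest [v]]
          simp [pvMergedNode, hslice, pvFlush]
        · -- n is not a text node
          have hstep : pvRuns ((n : Int)) (v :: rest) = pvRuns ((n : Int) + 1) rest := by
            rw [pvRuns, if_neg h]
          rw [hstep] at hR
          have hncont : (pvTps (pvRuns 0 children)).contains (n : Int) = false := by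
            by_contra hc
            simp only [Bool.not_eq_false] at hc
            obtain ⟨p, hp, h1, h2⟩ := (pvTps_contains_iff _ _).1 hc
            rw [hR] at hp
            rcases List.mem_append.1 hp with hp | hp
            · have := hbnd p hp; omega
            · have := pvRuns_lb _ _ p hp; omega
          have hget : (pvRd (pvRuns 0 children)).get? (n : Int) = none := by
            apply pvRd_get_none
            intro p hp
            rw [hR] at hp
            rcases List.mem_append.1 hp with hp | hp
            · have := hbnd p hp; omega
            · have := pvRuns_lb _ _ p hp; omega
          have hout := (ih (n + 1) past hrest).1
            (by push_cast; exact hR)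
            (fun p hp => ⟨(hbnd p hp).1, by have := (hbnd p hp).2; omega⟩)
          push_cast at hout
          simp only [pvOutGo, hncont, Bool.false_eq_true, if_false, hget]
          rw [hout]
          have hb : pvHasText v = false := by simpa using h
          simp [pvBGo, hb, pvFlush]
      · -- IN state: children[n-1] is a text node of the run that started at s₀
        intro s₀ hs hR hbnd
        by_cases h : pvHasText v
        · -- still inside the run
          rw [List.takeWhile_cons_of_pos h, List.dropWhile_cons_of_pos h] at hR
          push_cast [List.length_cons] at hR
          have hcont : (pvTps (pvRuns 0 children)).contains (n : Int) = true := by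
            apply (pvTps_contains_iff _ _).2
            refine ⟨(s₀, (n : Int) - 1 + (((rest.takeWhile pvHasText).length : Int) + 1)), ?_, by omega, by omega⟩
            rw [hR]; simp
          have hget : (pvRd (pvRuns 0 children)).get? (n : Int) = none := by
            apply pvRd_get_none
            intro p hp
            rw [hR] at hp
            rcases List.mem_append.1 hp with hp | hp
            · have := hbnd p hp; omega
            · rcases List.mem_cons.1 hp with rfl | hp'
              · simp; omega
              · have := pvRuns_lb _ _ p hp'; omega
          have hin := (ih (n + 1) past hrest).2 s₀ (by push_cast; omega)
            (by push_cast
                rw [show ((n : Int) + 1 - 1 + ((rest.takeWhile pvHasText).length : Int))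
                      = (n : Int) - 1 + (((rest.takeWhile pvHasText).length : Int) + 1) by ring,
                    show ((n : Int) + 1 + ((rest.takeWhile pvHasText).length : Int))
                      = (n : Int) + (((rest.takeWhile pvHasText).length : Int) + 1) by ring]
                exact hR)
            hbnd
          push_cast at hin
          simp only [pvOutGo, hcont, if_true, hget, List.nil_append]
          rw [hin, List.dropWhile_cons_of_pos h]
        · -- the run ended just before n
          have hb : pvHasText v = false := by simpa using h
          rw [List.takeWhile_cons_of_neg (by simp [hb]), List.dropWhile_cons_of_neg (by simp [hb])] at hR
          simp only [List.length_nil, Nat.cast_zero, add_zero] at hR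
          have hstep : pvRuns ((n : Int)) (v :: rest) = pvRuns ((n : Int) + 1) rest := by
            rw [pvRuns, if_neg h]
          rw [hstep] at hR
          have hncont : (pvTps (pvRuns 0 children)).contains (n : Int) = false := by
            by_contra hc
            simp only [Bool.not_eq_false] at hc
            obtain ⟨p, hp, h1, h2⟩ := (pvTps_contains_iff _ _).1 hc
            rw [hR] at hp
            rcases List.mem_append.1 hp with hp | hp
            · have := hbnd p hp; omega
            · rcases List.mem_cons.1 hp with rfl | hp'
              · simp at h1 h2
              · have := pvRuns_lb _ _ p hp'; omega
          have hget : (pvRd (pvRuns 0 children)).get? (n : Int) = none := by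
            apply pvRd_get_none
            intro p hp
            rw [hR] at hp
            rcases List.mem_append.1 hp with hp | hp
            · have := hbnd p hp; omega
            · rcases List.mem_cons.1 hp with rfl | hp'
              · simp; omega
              · have := pvRuns_lb _ _ p hp'; omega
          have hout := (ih (n + 1) (past ++ [(s₀, (n : Int) - 1)]) hrest).1
            (by push_cast
                rw [List.append_assoc]
                simpa using hR)
            (by intro p hp
                rcases List.mem_append.1 hp with hp | hp
                · have := hbnd p hp; constructor
                  · exact this.1
                  · push_cast; omega
                · have : p = (s₀, (n : Int) - 1) := by simpa using hp
                  subst this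
                  refine ⟨by simp; omega, by simp⟩)
          push_cast at hout
          simp only [pvOutGo, hncont, Bool.false_eq_true, if_false, hget]
          rw [hout]
          simp [pvBGo, hb, pvFlush]

-- ===== VERDICT (by name: the statement is the Claim_ definition above) =====
theorem merge_adjacent_text_nodes_spec : Claim_equal_merge_adjacent_text_nodes := by
  intro children _
  show merge_adjacent_text_nodes children = merge_adjacent_text_nodes_alt children
  have hr : pvRangesGo 0 [] children = pvRuns 0 children := by
    simpa using (pvRangesGo_spec children 0).1 [] (by simp)
  have h := ((pvMain children children 0 []) (by simp)).1 (by simp) (by simp)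
  simpa [merge_adjacent_text_nodes, merge_adjacent_text_nodes_alt, hr] using h
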